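-- pv_equiv track=rewrite | github.com/igorrazumny/logs-ai-reporting-model-train | src/ui/web/view_chat.py | _build_recent_context
-- ===== SOURCE A (Python) =====
-- def _build_recent_context(history, n: int = 3, max_chars: int = 300) -> str:
--     """
--     Build a compact conversational context from the last n turns.
--     Include user question and assistant answer, trimmed to max_chars total.
--     """
--     if not history:
--         return ""
--     turns = history[-n:]
--     bullets, total = [], 0
--     for t in turns:
--         u = (t.get("user") or "").strip()
--         a = (t.get("answer") or "").strip()
--         if u:
--             s = f"- User: {u}"
--             if total + len(s) + 1 > max_chars:
--                 break
--             bullets.append(s)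
--             total += len(s) + 1
--         if a:
--             s = f"- Answer: {a}"
--             if total + len(s) + 1 > max_chars:
--                 break
--             bullets.append(s)
--             total += len(s) + 1
--     return ("Recent context:\n" + "\n".join(bullets)) if bullets else ""
-- ===== SOURCE B (Python) =====
-- def _build_recent_context(history, n: int = 3, max_chars: int = 300) -> str:
--     if not history:
--         return ""
--     candidates = []
--     for t in history[-n:]:
--         u = (t.get("user") or "").strip()
--         a = (t.get("answer") or "").strip()
--         if u:
--             candidates.append(f"- User: {u}")
--         if a:
--             candidates.append(f"- Answer: {a}")
--     kept, total = [], 0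
--     for s in candidates:
--         if total + len(s) + 1 > max_chars:
--             break
--         kept.append(s)
--         total += len(s) + 1
--     return ("Recent context:\n" + "\n".join(kept)) if kept else ""
-- ===== Notes on version B (the rewrite author's own statement) =====
-- stated objective: alternative
-- what changed: A interleaves formatting and budget-trimming in one loop with per-turn break logic; B first builds the flat candidate bullet list from history[-n:], then applies the greedy character budget in a separate single pass.
import Mathlib
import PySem

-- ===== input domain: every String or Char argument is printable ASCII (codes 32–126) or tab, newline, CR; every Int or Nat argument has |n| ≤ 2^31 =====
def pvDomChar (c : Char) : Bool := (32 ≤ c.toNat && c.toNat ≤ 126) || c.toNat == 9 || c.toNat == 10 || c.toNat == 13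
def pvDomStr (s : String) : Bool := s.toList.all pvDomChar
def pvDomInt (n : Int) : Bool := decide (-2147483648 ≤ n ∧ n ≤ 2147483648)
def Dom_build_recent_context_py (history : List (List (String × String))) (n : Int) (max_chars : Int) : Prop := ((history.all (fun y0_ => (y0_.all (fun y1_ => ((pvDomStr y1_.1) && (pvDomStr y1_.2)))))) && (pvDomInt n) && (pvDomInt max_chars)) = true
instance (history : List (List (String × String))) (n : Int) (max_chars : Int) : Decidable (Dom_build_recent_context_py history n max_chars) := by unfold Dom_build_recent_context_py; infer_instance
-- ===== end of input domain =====

-- B builds the candidate bullet list in one pass and applies the greedy character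
-- budget in a separate pass (alternative decomposition; same cost, no speed claim).

-- ===== PORT A =====
-- one of A's two identical "append if it fits, else break" blocks (literal accounting)
def pvA_half (max_chars : Int) (s : String) (bullets : List String) (total : Int) :
    List String × Int × Bool :=
  if total + PySem.Str.len s + 1 > max_chars then (bullets, total, true)
  else (bullets ++ [s], total + PySem.Str.len s + 1, false)

-- A's loop body over one turn; the Bool is the "break happened" flag that skips the rest of the loop
def pvA_step (max_chars : Int) (st : List String × Int × Bool) (t : List (String × String)) :
    List String × Int × Bool :=
  match st with
  | (bullets, total, true) => (bullets, total, true)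
  | (bullets, total, false) =>
    let u := PySem.Str.strip ((PySem.Dict.mk t).getD "user" "")
    let a := PySem.Str.strip ((PySem.Dict.mk t).getD "answer" "")
    let st1 := if u ≠ "" then pvA_half max_chars ("- User: " ++ u) bullets total
               else (bullets, total, false)
    match st1 with
    | (b1, t1, true) => (b1, t1, true)
    | (b1, t1, false) =>
      if a ≠ "" then pvA_half max_chars ("- Answer: " ++ a) b1 t1 else (b1, t1, false)

def build_recent_context_py (history : List (List (String × String))) (n : Int) (max_chars : Int) : String :=
  if history = [] then ""
  else
    let turns := PySem.List.slice history (some (-n)) none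
    let res := turns.foldl (pvA_step max_chars) ([], 0, false)
    if res.1 = [] then "" else "Recent context:\n" ++ PySem.Str.join "\n" res.1

-- ===== PORT B =====
-- candidate bullets of one turn, in order
def pvB_cand (t : List (String × String)) : List String :=
  let u := PySem.Str.strip ((PySem.Dict.mk t).getD "user" "")
  let a := PySem.Str.strip ((PySem.Dict.mk t).getD "answer" "")
  (if u ≠ "" then ["- User: " ++ u] else []) ++ (if a ≠ "" then ["- Answer: " ++ a] else [])

-- greedy pass: keep while it fits, stop at the first overflow
def pvB_greedy (max_chars : Int) : List String → List String → Int → List String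
  | [], kept, _ => kept
  | s :: rest, kept, total =>
    if total + PySem.Str.len s + 1 > max_chars then kept
    else pvB_greedy max_chars rest (kept ++ [s]) (total + PySem.Str.len s + 1)

def build_recent_context_py_alt (history : List (List (String × String))) (n : Int) (max_chars : Int) : String :=
  if history = [] then ""
  else
    let turns := PySem.List.slice history (some (-n)) none
    let kept := pvB_greedy max_chars (turns.flatMap pvB_cand) [] 0
    if kept = [] then "" else "Recent context:\n" ++ PySem.Str.join "\n" kept

-- ===== PRECONDITION & SPEC =====
def Spec_build_recent_context_py (history : List (List (String × String))) (n : Int) (max_chars : Int) (out : String) : Prop := out = build_recent_context_py_alt history n max_chars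
instance (history : List (List (String × String))) (n : Int) (max_chars : Int) (out : String) : Decidable (Spec_build_recent_context_py history n max_chars out) := by unfold Spec_build_recent_context_py; infer_instance

-- ===== CLAIM (what is proved, stated in full; the proofs are below) =====
def Claim_equal_build_recent_context_py : Prop := ∀ (history : List (List (String × String))) (n : Int) (max_chars : Int), Dom_build_recent_context_py history n max_chars → Spec_build_recent_context_py history n max_chars (build_recent_context_py history n max_chars)

-- ===== LEMMAS AND PROOFS =====

-- greedy step on a single candidate, with the "already broken" flag
def pvG (max_chars : Int) (st : List String × Int × Bool) (s : String) : List String × Int × Bool :=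
  match st with
  | (b, tot, true) => (b, tot, true)
  | (b, tot, false) => pvA_half max_chars s b tot

theorem pvG_foldl_broken (max_chars : Int) (b : List String) (tot : Int) (cs : List String) :
    cs.foldl (pvG max_chars) (b, tot, true) = (b, tot, true) := by
  induction cs with
  | nil => rfl
  | cons c cs ih => simpa [pvG] using ih

theorem pvA_step_eq (max_chars : Int) (st : List String × Int × Bool) (t : List (String × String)) :
    pvA_step max_chars st t = (pvB_cand t).foldl (pvG max_chars) st := by
  obtain ⟨b, tot, br⟩ := st
  cases br with
  | true => simp [pvA_step, pvG_foldl_broken]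
  | false =>
    simp only [pvA_step, pvB_cand]
    by_cases hu : PySem.Str.strip ((PySem.Dict.mk t).getD "user" "") = ""
    · by_cases ha : PySem.Str.strip ((PySem.Dict.mk t).getD "answer" "") = ""
      · simp [hu, ha]
      · simp only [hu, ha, ne_eq, not_true_eq_false, not_false_eq_true, ite_true, ite_false,
          List.nil_append, List.foldl_cons, List.foldl_nil]
        rfl
    · by_cases ha : PySem.Str.strip ((PySem.Dict.mk t).getD "answer" "") = "" <;>
      · simp only [hu, ha, ne_eq, not_true_eq_false, not_false_eq_true, ite_true, ite_false,
          List.append_nil, List.foldl_cons, List.foldl_nil]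
        rcases hh : pvA_half max_chars
            ("- User: " ++ PySem.Str.strip ((PySem.Dict.mk t).getD "user" "")) b tot
          with ⟨b1, t1, br1⟩
        cases br1 <;> simp [pvG, hh]

theorem pvA_foldl_eq (max_chars : Int) (ts : List (List (String × String)))
    (st : List String × Int × Bool) :
    ts.foldl (pvA_step max_chars) st = (ts.flatMap pvB_cand).foldl (pvG max_chars) st := by
  induction ts generalizing st with
  | nil => rfl
  | cons t ts ih =>
    simp only [List.foldl_cons, List.flatMap_cons, List.foldl_append, pvA_step_eq, ih]

theorem pvG_foldl_fst (max_chars : Int) (cs : List String) (b : List String) (tot : Int) :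
    (cs.foldl (pvG max_chars) (b, tot, false)).1 = pvB_greedy max_chars cs b tot := by
  induction cs generalizing b tot with
  | nil => rfl
  | cons c cs ih =>
    simp only [List.foldl_cons, pvB_greedy, pvG, pvA_half]
    split_ifs with h
    · rw [pvG_foldl_broken]
    · exact ih _ _

-- ===== VERDICT (by name: the statement is the Claim_ definition above) =====
theorem build_recent_context_py_spec : Claim_equal_build_recent_context_py := by
  intro history n max_chars _
  unfold Spec_build_recent_context_py build_recent_context_py build_recent_context_py_alt
  by_cases h : history = []
  · simp [h]
  · simp only [h, if_false]
    rw [pvA_foldl_eq, pvG_foldl_fst]
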